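-- pv_equiv track=rewrite | github.com/Smart-Hypercube/leetcode | _includes/656.py | cheapestJump
-- ===== SOURCE A (Python) =====
-- def cheapestJump(A, B):
--     """
--     :type A: List[int]
--     :type B: int
--     :rtype: List[int]
--     """
--     cost = [-1] * len(A) + [0] + [-1] * (B-1)
--     path = [()] * len(A) + [()] *B
--     for i in range(len(A)):
--         if A[i] == -1:
--             cost[i] = -1
--         else:
--             try:
--                 c, p = min(((cost[i-j], path[i-j]+(i,)) for j in range(1, B+1) if cost[i-j] != -1))
--                 cost[i] = c+A[i]
--                 path[i] = p
--             except ValueError: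
--                 cost[i] = -1
--                 path[i] = ()
--     return [i+1 for i in path[len(A)-1]]
-- ===== SOURCE B (Python) =====
-- from collections import deque
--
-- def cheapestJump(A, B):
--     n = len(A)
--     if n == 0 or B < 1:
--         return []
--
--     def better(c1, p1, c2, p2):
--         """Does state (cost c1, path p1) beat (c2, p2) as a jump predecessor?
--         Cheaper wins; on equal cost the path that stays lexicographically
--         smaller after any future extension wins: every index appended later
--         exceeds all current entries, so when one path is a prefix of the
--         other the longer path wins, otherwise plain lexicographic order."""
--         if c1 != c2:
--             return c1 < c2
--         m = min(len(p1), len(p2))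
--         if p1[:m] == p2[:m]:
--             return len(p1) > len(p2)
--         return p1 < p2
--
--     dq = deque()  # (index, cost, path); front = best predecessor in window
--     best = None
--     for i in range(n):
--         while dq and dq[0][0] < i - B:
--             dq.popleft()
--         if A[i] == -1:
--             best = None
--         elif i == 0:
--             best = (A[0], [0])
--         elif dq:
--             _, c, p = dq[0]
--             best = (c + A[i], p + [i])
--         else:
--             best = None
--         if best is not None:
--             while dq and not better(dq[-1][1], dq[-1][2], best[0], best[1]):
--                 dq.pop()
--             dq.append((i, best[0], best[1]))
--     return [k + 1 for k in best[1]] if best is not None else []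
-- ===== Notes on version B (the rewrite author's own statement) =====
-- stated objective: faster
-- what changed: replaces A's per-position rescan of the whole jump window (Python min over up to B (cost,path) tuples at every index, over padded sentinel arrays with negative-index wraparound and try/except) by a monotonic deque maintaining the sliding-window best (cost,path) predecessor under an extension-aware comparator, so each position costs amortized O(1) deque operations; Pre_ excludes the empty list with B<1 (A raises IndexError) and, for B>=1, lists with entries below -1, outside the task's natural domain where a cell is a nonnegative cost or -1 = blocked
-- outside the precondition, e.g. on cheapestJump([-2, 1, 0], 1): A returns [], B returns [1, 2, 3]
import Mathlib
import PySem

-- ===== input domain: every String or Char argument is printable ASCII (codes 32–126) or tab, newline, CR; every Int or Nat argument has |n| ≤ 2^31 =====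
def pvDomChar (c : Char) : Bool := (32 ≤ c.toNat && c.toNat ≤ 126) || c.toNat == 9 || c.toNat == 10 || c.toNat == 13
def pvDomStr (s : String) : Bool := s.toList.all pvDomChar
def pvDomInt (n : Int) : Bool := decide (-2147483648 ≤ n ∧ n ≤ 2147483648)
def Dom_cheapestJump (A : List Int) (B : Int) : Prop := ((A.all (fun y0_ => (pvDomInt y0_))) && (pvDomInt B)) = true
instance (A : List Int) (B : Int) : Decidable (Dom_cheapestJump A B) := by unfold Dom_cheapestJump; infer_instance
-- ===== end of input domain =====

-- B replaces A's per-position rescan of the whole jump window by a monotonic deque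
-- maintaining the sliding-window best (cost, path) predecessor (objective: faster).

-- ===== PORT A =====
-- one iteration of A's `for i in range(len(A))` loop over the (cost, path) arrays
def stepA (A : List Int) (B : Int) (st : List Int × List (List Int)) (i : Nat) :
    List Int × List (List Int) :=
  if PySem.List.pyGetD A (i : Int) 0 = -1 then
    (PySem.List.pySetD st.1 (i : Int) (-1), st.2)
  else
    match PySem.List.min2? (((PySem.List.pyRange 1 (B + 1) 1).filter
        (fun j => decide (PySem.List.pyGetD st.1 ((i : Int) - j) 0 ≠ -1))).map
        (fun j => (PySem.List.pyGetD st.1 ((i : Int) - j) 0,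
                   PySem.List.pyGetD st.2 ((i : Int) - j) [] ++ [(i : Int)])))
        Prod.fst Prod.snd with
    | some (c, p) =>
        (PySem.List.pySetD st.1 (i : Int) (c + PySem.List.pyGetD A (i : Int) 0),
         PySem.List.pySetD st.2 (i : Int) p)
    | none => (PySem.List.pySetD st.1 (i : Int) (-1), PySem.List.pySetD st.2 (i : Int) [])

def cheapestJump (A : List Int) (B : Int) : List Int :=
  (PySem.List.pyGetD
    (((List.range A.length).foldl (stepA A B)
        (List.replicate A.length (-1) ++ [0] ++ List.replicate (B - 1).toNat (-1),
         List.replicate A.length [] ++ List.replicate B.toNat [])).2)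
    ((A.length : Int) - 1) []).map (· + 1)

-- ===== PORT B =====
-- B's helper `better`: does state (c1, p1) beat (c2, p2) as a jump predecessor?
-- (p1[:m] is List.take m, exact for 0 ≤ m ≤ the list's length)
def better (c1 : Int) (p1 : List Int) (c2 : Int) (p2 : List Int) : Bool :=
  if c1 ≠ c2 then decide (c1 < c2)
  else if p1.take (min p1.length p2.length) = p2.take (min p1.length p2.length) then
    decide (p2.length < p1.length)
  else decide (p1 < p2)

-- `while dq and dq[0][0] < i - B: dq.popleft()`
def popFront (B : Int) (dq : List (Int × Int × List Int)) (i : Nat) :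
    List (Int × Int × List Int) :=
  dq.dropWhile (fun t => decide (t.1 < (i : Int) - B))

-- the if/elif chain computing best
def curOf (A : List Int) (dq : List (Int × Int × List Int)) (i : Nat) :
    Option (Int × List Int) :=
  if PySem.List.pyGetD A (i : Int) 0 = -1 then none
  else if i = 0 then some (PySem.List.pyGetD A 0 0, [0])
  else match dq.head? with
    | some (_, c, p) => some (c + PySem.List.pyGetD A (i : Int) 0, p ++ [(i : Int)])
    | none => none

-- `while dq and not better(dq[-1][1], dq[-1][2], best[0], best[1]): dq.pop()` then append
def pushBack (dq : List (Int × Int × List Int)) (i : Nat) (v : Int × List Int) :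
    List (Int × Int × List Int) :=
  (dq.reverse.dropWhile (fun t => !better t.2.1 t.2.2 v.1 v.2)).reverse
    ++ [((i : Int), v.1, v.2)]

def stepB (A : List Int) (B : Int)
    (st : List (Int × Int × List Int) × Option (Int × List Int)) (i : Nat) :
    List (Int × Int × List Int) × Option (Int × List Int) :=
  match curOf A (popFront B st.1 i) i with
  | none => (popFront B st.1 i, none)
  | some v => (pushBack (popFront B st.1 i) i v, some v)

def cheapestJump_alt (A : List Int) (B : Int) : List Int :=
  if A.length = 0 || B < 1 then []
  else
    match ((List.range A.length).foldl (stepB A B) ([], none)).2 with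
    | some cp => cp.2.map (· + 1)
    | none => []

-- ===== PRECONDITION & SPEC =====
-- Pre_ excludes (a) the empty list with B < 1, on which A raises IndexError, and
-- (b) for positive jump windows, lists with entries below -1 — outside the task's
-- natural domain, where a cell is either a nonnegative cost or -1 meaning blocked,
-- so neither program's value there is specified by the task.
def Pre_cheapestJump (A : List Int) (B : Int) : Prop :=
  (A ≠ [] ∨ 1 ≤ B) ∧ (B < 1 ∨ ∀ x ∈ A, -1 ≤ x)
instance (A : List Int) (B : Int) : Decidable (Pre_cheapestJump A B) := by
  unfold Pre_cheapestJump; infer_instance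
def pvWitness_cheapestJump : List Int × Int := ([0, -1, 2, 1], 2)

def Spec_cheapestJump (A : List Int) (B : Int) (out : List Int) : Prop :=
  out = cheapestJump_alt A B
instance (A : List Int) (B : Int) (out : List Int) : Decidable (Spec_cheapestJump A B out) := by
  unfold Spec_cheapestJump; infer_instance

-- ===== CLAIM (what is proved, stated in full; the proofs are below) =====
def Claim_equal_cheapestJump : Prop := ∀ (A : List Int) (B : Int), Dom_cheapestJump A B →
  Pre_cheapestJump A B → Spec_cheapestJump A B (cheapestJump A B)
-- ===== LEMMAS AND PROOFS =====

-- ---------- spec-side view of A's DP table ----------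

def cOf (o : Option (Int × List Int)) : Int :=
  match o with | none => -1 | some cp => cp.1

def pOf (o : Option (Int × List Int)) : List Int :=
  match o with | none => [] | some cp => cp.2

def costOf (A : List Int) (B : Int) (ds : List (Option (Int × List Int))) : List Int :=
  ds.map cOf ++ List.replicate (A.length - ds.length) (-1) ++ [0] ++
    List.replicate (B - 1).toNat (-1)

def pathOf (A : List Int) (B : Int) (ds : List (Option (Int × List Int))) : List (List Int) :=
  ds.map pOf ++ List.replicate (A.length - ds.length) [] ++ List.replicate B.toNat []

def candsOf (A : List Int) (B : Int) (ds : List (Option (Int × List Int))) :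
    List (Int × List Int) :=
  ((PySem.List.pyRange 1 (B + 1) 1).filter
      (fun j => decide (PySem.List.pyGetD (costOf A B ds) ((ds.length : Int) - j) 0 ≠ -1))).map
      (fun j => (PySem.List.pyGetD (costOf A B ds) ((ds.length : Int) - j) 0,
                 PySem.List.pyGetD (pathOf A B ds) ((ds.length : Int) - j) [] ++ [(ds.length : Int)]))

def dpv (A : List Int) (B : Int) (ds : List (Option (Int × List Int))) :
    Option (Int × List Int) :=
  if PySem.List.pyGetD A (ds.length : Int) 0 = -1 then none
  else match PySem.List.min2? (candsOf A B ds) Prod.fst Prod.snd with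
    | some cp => some (cp.1 + PySem.List.pyGetD A (ds.length : Int) 0, cp.2)
    | none => none

def dps (A : List Int) (B : Int) : Nat → List (Option (Int × List Int))
  | 0 => []
  | i + 1 => dps A B i ++ [dpv A B (dps A B i)]

def dp (A : List Int) (B : Int) (i : Nat) : Option (Int × List Int) := dpv A B (dps A B i)

def dpd (A : List Int) (B : Int) (k : Nat) : Int × List Int := (dp A B k).getD (0, [])

theorem dps_length (A : List Int) (B : Int) (i : Nat) : (dps A B i).length = i := by
  induction i with
  | zero => rfl
  | succ i ih => simp [dps, ih]

theorem dps_getElem? (A : List Int) (B : Int) {k i : Nat} (h : k < i) :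
    (dps A B i)[k]? = some (dp A B k) := by
  induction i with
  | zero => omega
  | succ i ih =>
    by_cases hk : k < i
    · rw [dps, List.getElem?_append_left (by rw [dps_length]; omega)]
      exact ih hk
    · have : k = i := by omega
      subst this
      rw [dps, List.getElem?_append_right (by rw [dps_length])]
      simp [dps_length, dp]

-- ---------- the two strict orders used in the min arguments ----------

-- Python's tuple comparison on (cost, path) candidates
def lt2 (a b : Int × List Int) : Prop := a.1 < b.1 ∨ (a.1 = b.1 ∧ a.2 < b.2)

-- the order B's deque maintains: paths compared as if padded by a common upper bound n
def appLt (n : Int) (a b : Int × List Int) : Prop :=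
  a.1 < b.1 ∨ (a.1 = b.1 ∧ a.2 ++ [n] < b.2 ++ [n])

def appLe (n : Int) (a b : Int × List Int) : Prop := a = b ∨ appLt n a b

theorem lt2_trans {a b c : Int × List Int} (h1 : lt2 a b) (h2 : lt2 b c) : lt2 a c := by
  rcases h1 with h1 | ⟨h1, h1'⟩ <;> rcases h2 with h2 | ⟨h2, h2'⟩
  · exact Or.inl (h1.trans h2)
  · exact Or.inl (h2 ▸ h1)
  · exact Or.inl (h1 ▸ h2)
  · exact Or.inr ⟨h1.trans h2, h1'.trans h2'⟩

theorem lt2_total {a b : Int × List Int} (h : ¬ lt2 a b) : lt2 b a ∨ a = b := by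
  rcases lt_trichotomy a.1 b.1 with h1 | h1 | h1
  · exact absurd (Or.inl h1) h
  · rcases lt_trichotomy a.2 b.2 with h2 | h2 | h2
    · exact absurd (Or.inr ⟨h1, h2⟩) h
    · right; exact Prod.ext h1 h2
    · left; exact Or.inr ⟨h1.symm, h2⟩
  · left; exact Or.inl h1

theorem appLt_trans {n : Int} {a b c : Int × List Int} (h1 : appLt n a b) (h2 : appLt n b c) :
    appLt n a c := by
  rcases h1 with h1 | ⟨h1, h1'⟩ <;> rcases h2 with h2 | ⟨h2, h2'⟩
  · exact Or.inl (h1.trans h2)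
  · exact Or.inl (h2 ▸ h1)
  · exact Or.inl (h1 ▸ h2)
  · exact Or.inr ⟨h1.trans h2, h1'.trans h2'⟩

theorem appLt_irrefl {n : Int} {a : Int × List Int} : ¬ appLt n a a := by
  rintro (h | ⟨-, h⟩) <;> exact lt_irrefl _ h

theorem appLt_asymm {n : Int} {a b : Int × List Int} (h : appLt n a b) : ¬ appLt n b a :=
  fun h' => appLt_irrefl (appLt_trans h h')

theorem appLt_total {n : Int} {a b : Int × List Int} (h : ¬ appLt n a b) : appLe n b a := by
  rcases lt_trichotomy a.1 b.1 with h1 | h1 | h1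
  · exact absurd (Or.inl h1) h
  · rcases lt_trichotomy (a.2 ++ [n]) (b.2 ++ [n]) with h2 | h2 | h2
    · exact absurd (Or.inr ⟨h1, h2⟩) h
    · exact Or.inl (Prod.ext h1.symm (List.append_cancel_right h2).symm)
    · exact Or.inr (Or.inr ⟨h1.symm, h2⟩)
  · exact Or.inr (Or.inl h1)

theorem appLe_trans_lt {n : Int} {a b c : Int × List Int} (h1 : appLe n a b)
    (h2 : appLe n b c) : appLe n a c := by
  rcases h1 with rfl | h1
  · exact h2
  · rcases h2 with rfl | h2
    · exact Or.inr h1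
    · exact Or.inr (appLt_trans h1 h2)

-- B's comparator decides appLt n whenever n bounds every path entry
theorem padded_lt_iff {n : Int} {p q : List Int}
    (hp : ∀ x ∈ p, x < n) (hq : ∀ x ∈ q, x < n) :
    p ++ [n] < q ++ [n] ↔
      (if p.take (min p.length q.length) = q.take (min p.length q.length)
        then q.length < p.length else p < q) := by
  induction p generalizing q with
  | nil =>
    cases q with
    | nil => simp
    | cons y ys =>
      have hy := hq y (by simp)
      rw [if_pos (by simp)]
      simp only [List.nil_append, List.cons_append, List.cons_lt_cons_iff,
        List.length_cons, List.length_nil]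
      constructor
      · rintro (h | ⟨h, -⟩) <;> omega
      · intro h; omega
  | cons x xs ih =>
    cases q with
    | nil =>
      have hx := hp x (by simp)
      rw [if_pos (by simp)]
      simp only [List.cons_append, List.nil_append, List.cons_lt_cons_iff,
        List.length_cons, List.length_nil]
      constructor
      · intro _; omega
      · intro _; exact Or.inl hx
    | cons y ys =>
      have hih := ih (q := ys) (fun a ha => hp a (by simp [ha])) (fun a ha => hq a (by simp [ha]))
      have hmin : min (x :: xs).length (y :: ys).length = min xs.length ys.length + 1 := by
        simp [Nat.succ_min_succ]
      rw [hmin]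
      simp only [List.take_succ_cons, List.cons_append, List.cons_lt_cons_iff, List.cons.injEq]
      by_cases hxy : x = y
      · subst hxy
        have hcond : (x = x ∧ xs.take (min xs.length ys.length) = ys.take (min xs.length ys.length))
            ↔ (xs.take (min xs.length ys.length) = ys.take (min xs.length ys.length)) := by simp
        rw [if_congr hcond rfl rfl]
        by_cases h : xs.take (min xs.length ys.length) = ys.take (min xs.length ys.length)
        · rw [if_pos h]
          rw [if_pos h] at hih
          simp only [List.length_cons, lt_irrefl, false_or, true_and]
          rw [hih]
          omega
        · rw [if_neg h]
          rw [if_neg h] at hih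
          simp only [lt_irrefl, false_or, true_and]
          rw [hih]
      · rw [if_neg (by simp [hxy])]
        constructor
        · rintro (h | ⟨h, -⟩)
          · exact Or.inl h
          · exact absurd h hxy
        · rintro (h | ⟨h, -⟩)
          · exact Or.inl h
          · exact absurd h hxy

theorem better_iff {n : Int} {a b : Int × List Int}
    (ha : ∀ x ∈ a.2, x < n) (hb : ∀ x ∈ b.2, x < n) :
    better a.1 a.2 b.1 b.2 = true ↔ appLt n a b := by
  unfold better appLt
  by_cases h1 : a.1 = b.1
  · rw [if_neg (by simpa using h1)]
    rw [show (a.2 ++ [n] < b.2 ++ [n]) =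
        (if a.2.take (min a.2.length b.2.length) = b.2.take (min a.2.length b.2.length)
          then b.2.length < a.2.length else a.2 < b.2) from propext (padded_lt_iff ha hb)]
    split_ifs with h2 <;> simp [h1]
  · rw [if_pos (by simpa using h1)]
    simp [h1]

-- sentinel invariance: appending any bound above all entries compares the same
theorem append_lt_congr {p q : List Int} {s t : Int}
    (hps : ∀ x ∈ p, x < s) (hqs : ∀ x ∈ q, x < s)
    (hpt : ∀ x ∈ p, x < t) (hqt : ∀ x ∈ q, x < t) :
    (p ++ [s] < q ++ [s] ↔ p ++ [t] < q ++ [t]) := by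
  induction p generalizing q with
  | nil =>
    cases q with
    | nil => simp [List.cons_lt_cons_iff]
    | cons y ys =>
      have hy := hqs y (by simp)
      have hy' := hqt y (by simp)
      simp [List.cons_lt_cons_iff]
      constructor <;> intro h <;> omega
  | cons x xs ih =>
    cases q with
    | nil =>
      have hx := hps x (by simp)
      have hx' := hpt x (by simp)
      simp [List.cons_lt_cons_iff]
      constructor <;> intro h <;> omega
    | cons y ys =>
      have := ih (q := ys) (fun a ha => hps a (by simp [ha])) (fun a ha => hqs a (by simp [ha]))
          (fun a ha => hpt a (by simp [ha])) (fun a ha => hqt a (by simp [ha]))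
      simp only [List.cons_append, List.cons_lt_cons_iff]
      rw [this]

theorem lt2_append_iff_appLt {n i : Int} {a b : Int × List Int}
    (ha : ∀ x ∈ a.2, x < i) (hb : ∀ x ∈ b.2, x < i)
    (ha' : ∀ x ∈ a.2, x < n) (hb' : ∀ x ∈ b.2, x < n) :
    lt2 (a.1, a.2 ++ [i]) (b.1, b.2 ++ [i]) ↔ appLt n a b := by
  unfold lt2 appLt
  rw [append_lt_congr ha hb ha' hb' (s := i) (t := n)]

-- ---------- what min2? computes (specialised to fst/snd pair keys) ----------

def mstep (acc : Option (Int × List Int)) (x : Int × List Int) : Option (Int × List Int) :=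
  match acc with
  | none => some x
  | some m =>
      if (decide (x.1 < m.1) || !decide (m.1 < x.1) && decide (x.2 < m.2)) = true then some x
      else some m

theorem min2?_eq_foldl (xs : List (Int × List Int)) :
    PySem.List.min2? xs Prod.fst Prod.snd = xs.foldl mstep none := by
  rw [PySem.List.min2?]
  congr 1
  funext acc x
  cases acc <;> rfl

theorem lt2_irrefl {a : Int × List Int} : ¬ lt2 a a := by
  rintro (h | ⟨-, h⟩) <;> exact lt_irrefl _ h

theorem mstep_some_lt {m x : Int × List Int} (h : lt2 x m) : mstep (some m) x = some x := by
  unfold mstep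
  rcases h with h | ⟨h, h'⟩
  · simp [h]
  · simp [h, h', lt_irrefl]

theorem mstep_some_not {m x : Int × List Int} (h : ¬ lt2 x m) : mstep (some m) x = some m := by
  unfold mstep
  by_cases h1 : x.1 < m.1
  · exact absurd (Or.inl h1) h
  · by_cases h2 : m.1 < x.1
    · simp [h1, h2]
    · have he : x.1 = m.1 := le_antisymm (not_lt.1 h2) (not_lt.1 h1)
      have h3 : ¬ x.2 < m.2 := fun hc => h (Or.inr ⟨he, hc⟩)
      simp [h1, h2, h3]

theorem min2?_fold_aux (xs : List (Int × List Int)) :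
    ∀ m0 : Int × List Int, ∃ m, xs.foldl mstep (some m0) = some m ∧
      (m = m0 ∨ m ∈ xs) ∧ ¬ lt2 m0 m ∧ ∀ y ∈ xs, ¬ lt2 y m := by
  induction xs with
  | nil => exact fun m0 => ⟨m0, rfl, Or.inl rfl, lt2_irrefl, by simp⟩
  | cons x xs ih =>
    intro m0
    rw [List.foldl_cons]
    by_cases hx : lt2 x m0
    · rw [mstep_some_lt hx]
      obtain ⟨m, hm, hmem, hxm, hall⟩ := ih x
      refine ⟨m, hm, (by rcases hmem with rfl | hm2; exacts [Or.inr (List.mem_cons_self ..), Or.inr (List.mem_cons_of_mem _ hm2)]), fun h => hxm (lt2_trans hx h), ?_⟩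
      intro y hy
      rcases List.mem_cons.1 hy with rfl | hy
      · exact hxm
      · exact hall y hy
    · rw [mstep_some_not hx]
      obtain ⟨m, hm, hmem, hxm, hall⟩ := ih m0
      refine ⟨m, hm, (by rcases hmem with rfl | hm2; exacts [Or.inl rfl, Or.inr (List.mem_cons_of_mem _ hm2)]), hxm, ?_⟩
      intro y hy
      rcases List.mem_cons.1 hy with rfl | hy
      · intro h
        rcases lt2_total hx with h' | h'
        · exact hxm (lt2_trans h' h)
        · subst h'; exact hxm h
      · exact hall y hy

theorem min2?_pair_spec {xs : List (Int × List Int)} {m : Int × List Int}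
    (h : PySem.List.min2? xs Prod.fst Prod.snd = some m) :
    m ∈ xs ∧ ∀ y ∈ xs, ¬ lt2 y m := by
  cases xs with
  | nil => simp [min2?_eq_foldl] at h
  | cons x xs =>
    rw [min2?_eq_foldl] at h
    obtain ⟨m', hm', hmem, hxm, hall⟩ := min2?_fold_aux xs x
    rw [List.foldl_cons] at h
    have hx : mstep none x = some x := rfl
    rw [hx] at h
    rw [hm'] at h
    obtain rfl : m' = m := by injection h
    refine ⟨(by rcases hmem with rfl | hm2; exacts [List.mem_cons_self .., List.mem_cons_of_mem _ hm2]), ?_⟩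
    intro y hy
    rcases List.mem_cons.1 hy with rfl | hy
    · exact hxm
    · exact hall y hy

theorem min2?_pair_none {xs : List (Int × List Int)} :
    PySem.List.min2? xs Prod.fst Prod.snd = none ↔ xs = [] := by
  cases xs with
  | nil => simp [min2?_eq_foldl]
  | cons x xs =>
    rw [min2?_eq_foldl, List.foldl_cons]
    have hx : mstep none x = some x := rfl
    rw [hx]
    obtain ⟨m, hm, -, -, -⟩ := min2?_fold_aux xs x
    simp [hm]


-- ---------- reading the padded arrays ----------

theorem len_costOf (A : List Int) (B : Int) (ds : List (Option (Int × List Int)))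
    (hB : 1 ≤ B) (hd : ds.length ≤ A.length) :
    (costOf A B ds).length = A.length + B.toNat := by
  simp [costOf]; omega

theorem len_pathOf (A : List Int) (B : Int) (ds : List (Option (Int × List Int)))
    (hB : 1 ≤ B) (hd : ds.length ≤ A.length) :
    (pathOf A B ds).length = A.length + B.toNat := by
  simp [pathOf]; omega

theorem costOf_get_lt (A : List Int) (B : Int) (ds : List (Option (Int × List Int)))
    {k : Nat} (hk : k < ds.length) :
    PySem.List.pyGetD (costOf A B ds) (k : Int) 0 = cOf (ds[k]?.getD none) := by
  rw [PySem.List.pyGetD_natCast, costOf, List.append_assoc, List.append_assoc,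
    List.getD_append _ _ _ _ (by simp [hk]), List.getD_eq_getElem?_getD,
    List.getElem?_map, List.getElem?_eq_getElem (by simpa using hk)]
  simp

theorem pathOf_get_lt (A : List Int) (B : Int) (ds : List (Option (Int × List Int)))
    {k : Nat} (hk : k < ds.length) :
    PySem.List.pyGetD (pathOf A B ds) (k : Int) [] = pOf (ds[k]?.getD none) := by
  rw [PySem.List.pyGetD_natCast, pathOf, List.append_assoc,
    List.getD_append _ _ _ _ (by simp [hk]), List.getD_eq_getElem?_getD,
    List.getElem?_map, List.getElem?_eq_getElem (by simpa using hk)]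
  simp

theorem costOf_get_neg (A : List Int) (B : Int) (ds : List (Option (Int × List Int)))
    (hB : 1 ≤ B) (hd : ds.length ≤ A.length) {j : Int} (h1 : 1 ≤ j) (hj : j ≤ B)
    (hneg : (ds.length : Int) - j < 0) (hi : 1 ≤ ds.length ∨ j < B) :
    PySem.List.pyGetD (costOf A B ds) ((ds.length : Int) - j) 0 = -1 := by
  have hlen : (costOf A B ds).length = A.length + B.toNat := len_costOf A B ds hB hd
  have hk : (ds.length : Int) - j = -(((j - ds.length).toNat : Nat) : Int) := by omega
  rw [hk, PySem.List.pyGetD_neg_natCast _ _ _ (by omega) (by omega)]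
  simp only [costOf]
  rw [List.getElem_append_right (by simp; omega)]
  simp

theorem costOf_get_start (A : List Int) (B : Int) (hB : 1 ≤ B) :
    PySem.List.pyGetD (costOf A B []) (0 - B) 0 = 0 := by
  have hlen : (costOf A B []).length = A.length + B.toNat := len_costOf A B [] hB (by simp)
  have hk : (0 : Int) - B = -((B.toNat : Nat) : Int) := by omega
  rw [hk, PySem.List.pyGetD_neg_natCast _ _ _ (by omega) (by omega)]
  simp only [costOf]
  rw [List.getElem_append_left (by simp; omega), List.getElem_append_right (by simp; omega)]
  simp

theorem pathOf_get_start (A : List Int) (B : Int) (hB : 1 ≤ B) :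
    PySem.List.pyGetD (pathOf A B []) (0 - B) [] = [] := by
  have hk : (0 : Int) - B = -((B.toNat : Nat) : Int) := by omega
  rw [hk, PySem.List.pyGetD_neg_natCast _ _ _ (by omega) (by simp [pathOf])]
  have hmem : ∀ x ∈ pathOf A B [], x = ([] : List Int) := by
    intro x hx
    simp only [pathOf, List.map_nil, List.nil_append, List.mem_append, List.mem_replicate] at hx
    rcases hx with ⟨-, h⟩ | ⟨-, h⟩ <;> exact h
  exact hmem _ (List.getElem_mem _)

-- the candidate list at i = 0 is exactly the virtual start
theorem cands0 (A : List Int) (B : Int) (hB : 1 ≤ B) :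
    candsOf A B [] = [(0, [0])] := by
  unfold candsOf
  simp only [List.length_nil, Nat.cast_zero]
  have hB' : (1 : Int) ≤ B := hB
  have hsplit : PySem.List.pyRange 1 (B + 1) 1 = PySem.List.pyRange 1 B 1 ++ [B] :=
    PySem.List.pyRange_one_succ_right hB'
  rw [hsplit, List.filter_append]
  have h1 : (PySem.List.pyRange 1 B 1).filter
      (fun j => decide (PySem.List.pyGetD (costOf A B []) ((0 : Int) - j) 0 ≠ -1)) = [] := by
    rw [List.filter_eq_nil_iff]
    intro j hj
    obtain ⟨hj1, hj2⟩ := PySem.List.mem_pyRange_one.1 hj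
    rw [show (0 : Int) - j = (([] : List (Option (Int × List Int))).length : Int) - j by simp,
      costOf_get_neg A B [] hB (by simp) hj1 (by omega) (by simp; omega) (by right; omega)]
    simp
  have h2 : List.filter
      (fun j => decide (PySem.List.pyGetD (costOf A B []) ((0 : Int) - j) 0 ≠ -1)) [B] = [B] := by
    rw [List.filter_singleton, costOf_get_start A B hB]
    simp
  rw [h1, h2]
  simp only [List.nil_append, List.map_cons, List.map_nil]
  rw [costOf_get_start A B hB, pathOf_get_start A B hB]
  simp

-- every candidate at step i ≥ 1 comes from a reachable window position
theorem cands_mem_elim (A : List Int) (B : Int) {i : Nat} (hB : 1 ≤ B) (h1 : 1 ≤ i)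
    (hin : i ≤ A.length)
    {y : Int × List Int} (hy : y ∈ candsOf A B (dps A B i)) :
    ∃ k : Nat, k < i ∧ (i : Int) - B ≤ (k : Int) ∧
      ∃ c p, dp A B k = some (c, p) ∧ y = (c, p ++ [(i : Int)]) := by
  unfold candsOf at hy
  rw [List.mem_map] at hy
  obtain ⟨j, hjf, rfl⟩ := hy
  rw [List.mem_filter] at hjf
  obtain ⟨hjr, hjp⟩ := hjf
  obtain ⟨hj1, hj2⟩ := PySem.List.mem_pyRange_one.1 hjr
  have hdsl : (dps A B i).length = i := dps_length A B i
  rw [hdsl] at hjp ⊢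
  by_cases hneg : (i : Int) - j < 0
  · rw [show (i : Int) = ((dps A B i).length : Int) by rw [hdsl]] at hjp
    rw [costOf_get_neg A B _ hB (by rw [hdsl]; omega) hj1 (by omega)
      (by rw [hdsl]; omega) (by left; rw [hdsl]; omega)] at hjp
    simp at hjp
  · obtain ⟨k, hkeq⟩ : ∃ k : Nat, (k : Int) = (i : Int) - j :=
      ⟨((i : Int) - j).toNat, by omega⟩
    have hki : k < i := by omega
    rw [← hkeq] at hjp ⊢
    rw [costOf_get_lt A B _ (by rw [hdsl]; omega)] at hjp ⊢
    rw [pathOf_get_lt A B _ (by rw [hdsl]; omega)]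
    rw [dps_getElem? A B hki] at hjp ⊢
    cases hdp : dp A B k with
    | none => rw [hdp] at hjp; simp [cOf] at hjp
    | some cp =>
      refine ⟨k, hki, by omega, cp.1, cp.2, hdp, ?_⟩
      simp [cOf, pOf]

-- A[i] reads
theorem pyGetA (A : List Int) {i : Nat} (hi : i < A.length) :
    PySem.List.pyGetD A (i : Int) 0 = A.getD i 0 := PySem.List.pyGetD_natCast ..

theorem getD_mem (A : List Int) {i : Nat} (hi : i < A.length) : A.getD i 0 ∈ A := by
  rw [List.getD_eq_getElem?_getD, List.getElem?_eq_getElem hi]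
  exact List.getElem_mem hi

-- reachable dp entries have nonnegative cost and in-range path entries
theorem dp_good (A : List Int) (B : Int) (hA : ∀ x ∈ A, -1 ≤ x) (hB : 1 ≤ B) :
    ∀ i : Nat, i < A.length → ∀ c p, dp A B i = some (c, p) →
      0 ≤ c ∧ ∀ x ∈ p, 0 ≤ x ∧ x ≤ (i : Int) := by
  intro i
  induction i using Nat.strong_induction_on with
  | _ i ih =>
    intro hin c p hdp
    unfold dp dpv at hdp
    rw [dps_length] at hdp
    by_cases hAi : PySem.List.pyGetD A (i : Int) 0 = -1
    · rw [if_pos hAi] at hdp; exact absurd hdp (by simp)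
    · rw [if_neg hAi] at hdp
      have hAge : 0 ≤ A.getD i 0 := by
        have h1 := hA _ (getD_mem A hin)
        rw [pyGetA A hin] at hAi
        omega
      cases hmin : PySem.List.min2? (candsOf A B (dps A B i)) Prod.fst Prod.snd with
      | none => rw [hmin] at hdp; simp at hdp
      | some m =>
        rw [hmin] at hdp
        simp only [Option.some.injEq] at hdp
        obtain ⟨hc, hp⟩ := Prod.mk.injEq .. ▸ hdp
        have hmem := (min2?_pair_spec hmin).1
        rcases Nat.eq_zero_or_pos i with rfl | hipos
        · rw [show dps A B 0 = [] from rfl, cands0 A B hB] at hmem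
          rw [List.mem_singleton] at hmem
          subst hmem
          rw [pyGetA A hin] at hc
          simp at hc hAge ⊢
          constructor
          · omega
          · intro x hx
            rw [← hp] at hx
            simp at hx
            omega
        · obtain ⟨k, hki, _, c0, p0, hdpk, hy⟩ := cands_mem_elim A B hB hipos (by omega) hmem
          obtain ⟨hg1, hg2⟩ := ih k hki (by omega) c0 p0 hdpk
          rw [hy] at hc hp
          rw [pyGetA A hin] at hc
          simp at hc hp hAge
          refine ⟨by omega, ?_⟩
          intro x hx
          rw [← hp] at hx
          rcases List.mem_append.1 hx with hx | hx
          · have := hg2 x hx; constructor <;> omega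
          · simp at hx; omega

-- every reachable window position contributes its candidate
theorem cands_mem_intro (A : List Int) (B : Int) {i : Nat} (hA : ∀ x ∈ A, -1 ≤ x)
    (hB : 1 ≤ B) (h1 : 1 ≤ i) (hin : i ≤ A.length) {k : Nat} (hki : k < i)
    (hwin : (i : Int) - B ≤ (k : Int)) {c : Int} {p : List Int}
    (hdp : dp A B k = some (c, p)) :
    (c, p ++ [(i : Int)]) ∈ candsOf A B (dps A B i) := by
  have hdsl : (dps A B i).length = i := dps_length A B i
  have hc0 : 0 ≤ c := (dp_good A B hA hB k (by omega) c p hdp).1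
  unfold candsOf
  rw [List.mem_map]
  refine ⟨((i - k : Nat) : Int), ?_, ?_⟩
  · rw [List.mem_filter]
    constructor
    · rw [PySem.List.mem_pyRange_one]
      constructor <;> [omega; omega]
    · rw [hdsl, show (i : Int) - ((i - k : Nat) : Int) = (k : Int) by omega,
        costOf_get_lt A B _ (by omega), dps_getElem? A B hki, hdp]
      simp [cOf]
      omega
  · rw [hdsl, show (i : Int) - ((i - k : Nat) : Int) = (k : Int) by omega,
      costOf_get_lt A B _ (by omega), pathOf_get_lt A B _ (by omega),
      dps_getElem? A B hki, hdp]
    simp [cOf, pOf]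


-- ---------- port A computes the dp table ----------

theorem pySetD_natCast {α : Type} (l : List α) (k : Nat) (v : α) (h : k < l.length) :
    PySem.List.pySetD l (k : Int) v = l.set k v := by
  have h1 : (0:Int) ≤ (k:Int) := by omega
  have h2 : (k:Int) < (l.length:Int) := by omega
  simp [PySem.List.pySetD, PySem.List.pySet?, PySem.List.pyIdx?, h1, h2]

theorem set_append_mid {α : Type} (xs zs : List α) (y v : α) :
    (xs ++ y :: zs).set xs.length v = xs ++ v :: zs := by
  rw [List.set_append_right _ _ (le_refl _)]
  simp

theorem costOf_split (A : List Int) (B : Int) (ds : List (Option (Int × List Int)))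
    (hlt : ds.length < A.length) :
    costOf A B ds = ds.map cOf ++ (-1) ::
      (List.replicate (A.length - ds.length - 1) (-1) ++ [0] ++
        List.replicate (B - 1).toNat (-1)) := by
  unfold costOf
  rw [show A.length - ds.length = (A.length - ds.length - 1) + 1 by omega,
    List.replicate_succ]
  simp

theorem pathOf_split (A : List Int) (B : Int) (ds : List (Option (Int × List Int)))
    (hlt : ds.length < A.length) :
    pathOf A B ds = ds.map pOf ++ ([] : List Int) ::
      (List.replicate (A.length - ds.length - 1) [] ++ List.replicate B.toNat []) := by
  unfold pathOf
  rw [show A.length - ds.length = (A.length - ds.length - 1) + 1 by omega,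
    List.replicate_succ]
  simp

theorem costOf_snoc (A : List Int) (B : Int) (ds : List (Option (Int × List Int)))
    (o : Option (Int × List Int)) (hlt : ds.length < A.length) :
    costOf A B (ds ++ [o]) = ds.map cOf ++ cOf o ::
      (List.replicate (A.length - ds.length - 1) (-1) ++ [0] ++
        List.replicate (B - 1).toNat (-1)) := by
  unfold costOf
  simp [show A.length - (ds.length + 1) = A.length - ds.length - 1 by omega]

theorem pathOf_snoc (A : List Int) (B : Int) (ds : List (Option (Int × List Int)))
    (o : Option (Int × List Int)) (hlt : ds.length < A.length) :
    pathOf A B (ds ++ [o]) = ds.map pOf ++ pOf o ::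
      (List.replicate (A.length - ds.length - 1) [] ++ List.replicate B.toNat []) := by
  unfold pathOf
  simp [show A.length - (ds.length + 1) = A.length - ds.length - 1 by omega]

theorem costOf_set (A : List Int) (B : Int) (ds : List (Option (Int × List Int)))
    (v : Int) (hlt : ds.length < A.length) (hB : 1 ≤ B) :
    PySem.List.pySetD (costOf A B ds) ((ds.length : Nat) : Int) v
      = ds.map cOf ++ v ::
        (List.replicate (A.length - ds.length - 1) (-1) ++ [0] ++
          List.replicate (B - 1).toNat (-1)) := by
  rw [pySetD_natCast _ _ _ (by rw [len_costOf A B ds hB (by omega)]; omega),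
    costOf_split A B ds hlt,
    show ds.length = (ds.map cOf).length by simp, set_append_mid]

theorem pathOf_set (A : List Int) (B : Int) (ds : List (Option (Int × List Int)))
    (v : List Int) (hlt : ds.length < A.length) (hB : 1 ≤ B) :
    PySem.List.pySetD (pathOf A B ds) ((ds.length : Nat) : Int) v
      = ds.map pOf ++ v ::
        (List.replicate (A.length - ds.length - 1) [] ++ List.replicate B.toNat []) := by
  rw [pySetD_natCast _ _ _ (by rw [len_pathOf A B ds hB (by omega)]; omega),
    pathOf_split A B ds hlt,
    show ds.length = (ds.map pOf).length by simp, set_append_mid]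

theorem stepA_eq (A : List Int) (B : Int) (ds : List (Option (Int × List Int)))
    (hB : 1 ≤ B) (hlt : ds.length < A.length) :
    stepA A B (costOf A B ds, pathOf A B ds) ds.length =
      (costOf A B (ds ++ [dpv A B ds]), pathOf A B (ds ++ [dpv A B ds])) := by
  unfold stepA dpv
  have hcands : ((PySem.List.pyRange 1 (B + 1) 1).filter
      (fun j => decide (PySem.List.pyGetD (costOf A B ds, pathOf A B ds).1
        ((ds.length : Int) - j) 0 ≠ -1))).map
      (fun j => (PySem.List.pyGetD (costOf A B ds, pathOf A B ds).1
          ((ds.length : Int) - j) 0,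
        PySem.List.pyGetD (costOf A B ds, pathOf A B ds).2
          ((ds.length : Int) - j) [] ++ [(ds.length : Int)]))
      = candsOf A B ds := rfl
  rw [hcands]
  by_cases hAi : PySem.List.pyGetD A ((ds.length : Nat) : Int) 0 = -1
  · rw [if_pos hAi, if_pos hAi]
    rw [costOf_snoc A B ds none hlt, pathOf_snoc A B ds none hlt,
      costOf_set A B ds (-1) hlt hB]
    rw [Prod.mk.injEq]
    exact ⟨rfl, by rw [pathOf_split A B ds hlt]; rfl⟩
  · rw [if_neg hAi, if_neg hAi]
    cases hmin : PySem.List.min2? (candsOf A B ds) Prod.fst Prod.snd with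
    | none =>
      simp only [hmin]
      rw [costOf_snoc A B ds none hlt, pathOf_snoc A B ds none hlt,
        costOf_set A B ds (-1) hlt hB, pathOf_set A B ds [] hlt hB]
      simp [cOf, pOf]
    | some cp =>
      simp only [hmin]
      rw [costOf_snoc A B ds _ hlt, pathOf_snoc A B ds _ hlt,
        costOf_set A B ds _ hlt hB, pathOf_set A B ds _ hlt hB]
      simp [cOf, pOf]

theorem foldA (A : List Int) (B : Int) (hB : 1 ≤ B) :
    ∀ i : Nat, i ≤ A.length →
      (List.range i).foldl (stepA A B) (costOf A B [], pathOf A B []) =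
        (costOf A B (dps A B i), pathOf A B (dps A B i)) := by
  intro i
  induction i with
  | zero => intro _; rfl
  | succ i ih =>
    intro hin
    rw [List.range_succ, List.foldl_append, ih (by omega), List.foldl_cons, List.foldl_nil]
    have h := stepA_eq A B (dps A B i) hB (by rw [dps_length]; omega)
    rw [dps_length] at h
    rw [h]
    rfl

theorem cheapestJump_eq_dp (A : List Int) (B : Int) (hB : 1 ≤ B) (hn : 1 ≤ A.length) :
    cheapestJump A B = (pOf (dp A B (A.length - 1))).map (· + 1) := by
  unfold cheapestJump
  have hinit : (List.replicate A.length (-1) ++ [0] ++ List.replicate (B - 1).toNat (-1),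
      List.replicate A.length ([] : List Int) ++ List.replicate B.toNat []) =
      (costOf A B [], pathOf A B []) := by
    simp [costOf, pathOf]
  rw [hinit, foldA A B hB A.length (le_refl _)]
  rw [show ((A.length : Int) - 1) = ((A.length - 1 : Nat) : Int) by omega,
    PySem.List.pyGetD_natCast]
  unfold pathOf
  rw [List.append_assoc, List.getD_append _ _ _ _ (by simp [dps_length]; omega),
    List.getD_eq_getElem?_getD, List.getElem?_map, dps_getElem? A B (by omega)]
  simp

-- with B < 1 every position is unreachable and A returns []
theorem pyRange_emp (B : Int) (hB : B < 1) : PySem.List.pyRange 1 (B + 1) 1 = [] := by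
  have : ∀ x, ¬ x ∈ PySem.List.pyRange 1 (B + 1) 1 := by
    intro x hx
    have := PySem.List.mem_pyRange_one.1 hx
    omega
  exact List.eq_nil_iff_forall_not_mem.2 this

theorem stepA_small (A : List Int) (B : Int) (hB : B < 1)
    (st : List Int × List (List Int)) (i : Nat)
    (hp : ∀ q ∈ st.2, q = ([] : List Int)) :
    ∀ q ∈ (stepA A B st i).2, q = ([] : List Int) := by
  intro q hq
  unfold stepA at hq
  by_cases hAi : PySem.List.pyGetD A (i : Int) 0 = -1
  · rw [if_pos hAi] at hq
    exact hp q hq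
  · rw [if_neg hAi] at hq
    rw [pyRange_emp B hB] at hq
    simp only [List.filter_nil, List.map_nil, PySem.List.min2?, List.foldl_nil] at hq
    simp only [PySem.List.pySetD, PySem.List.pySet?] at hq
    cases hidx : PySem.List.pyIdx? st.2.length (i : Int) with
    | none => rw [hidx] at hq; simp at hq; exact hp q hq
    | some k =>
      rw [hidx] at hq
      simp at hq
      rcases List.mem_or_eq_of_mem_set hq with h | h
      · exact hp q h
      · exact h

theorem len_pySetD {α : Type} (l : List α) (i : Int) (v : α) :
    (PySem.List.pySetD l i v).length = l.length := by
  simp only [PySem.List.pySetD, PySem.List.pySet?]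
  cases hidx : PySem.List.pyIdx? l.length i <;> simp

theorem stepA_len (A : List Int) (B : Int) (st : List Int × List (List Int)) (i : Nat) :
    (stepA A B st i).2.length = st.2.length := by
  unfold stepA
  by_cases hAi : PySem.List.pyGetD A (i : Int) 0 = -1
  · rw [if_pos hAi]
  · rw [if_neg hAi]
    split <;> simp [len_pySetD]

theorem foldA_small (A : List Int) (B : Int) (hB : B < 1) :
    ∀ (r : Nat) (st : List Int × List (List Int)), (∀ q ∈ st.2, q = ([] : List Int)) →
      ∀ q ∈ ((List.range r).foldl (stepA A B) st).2, q = ([] : List Int) := by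
  intro r
  induction r with
  | zero => intro st h; exact h
  | succ r ih =>
    intro st h
    rw [List.range_succ, List.foldl_append, List.foldl_cons, List.foldl_nil]
    exact stepA_small A B hB _ r (ih st h)

theorem foldA_len (A : List Int) (B : Int) :
    ∀ (r : Nat) (st : List Int × List (List Int)),
      ((List.range r).foldl (stepA A B) st).2.length = st.2.length := by
  intro r
  induction r with
  | zero => intro st; rfl
  | succ r ih =>
    intro st
    rw [List.range_succ, List.foldl_append, List.foldl_cons, List.foldl_nil,
      stepA_len, ih]

theorem cheapestJump_small (A : List Int) (B : Int) (hB : B < 1) (hn : 1 ≤ A.length) :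
    cheapestJump A B = [] := by
  unfold cheapestJump
  have hall := foldA_small A B hB A.length
    (List.replicate A.length (-1) ++ [0] ++ List.replicate (B - 1).toNat (-1),
     List.replicate A.length ([] : List Int) ++ List.replicate B.toNat [])
    (by intro q hq
        simp only [List.mem_append, List.mem_replicate] at hq
        rcases hq with ⟨-, h⟩ | ⟨-, h⟩ <;> exact h)
  have hlen := foldA_len A B A.length
    (List.replicate A.length (-1) ++ [0] ++ List.replicate (B - 1).toNat (-1),
     List.replicate A.length ([] : List Int) ++ List.replicate B.toNat [])
  rw [show ((A.length : Int) - 1) = ((A.length - 1 : Nat) : Int) by omega,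
    PySem.List.pyGetD_natCast, List.getD_eq_getElem?_getD,
    List.getElem?_eq_getElem (by rw [hlen]; simp; omega)]
  rw [hall _ (List.getElem_mem _)]
  rfl


-- ---------- port B: deque utilities ----------

theorem dropWhile_ge (ks : List Nat) (c : Int) (h : ks.Pairwise (· < ·)) :
    ∀ k ∈ ks.dropWhile (fun k : Nat => decide ((k : Int) < c)), c ≤ (k : Int) := by
  induction ks with
  | nil => simp
  | cons k t ih =>
    rw [List.pairwise_cons] at h
    intro x hx
    rw [List.dropWhile_cons] at hx
    by_cases hk : (k : Int) < c
    · rw [if_pos (by simpa using hk)] at hx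
      exact ih h.2 x hx
    · rw [if_neg (by simpa using hk)] at hx
      rcases List.mem_cons.1 hx with rfl | hx
      · omega
      · have := h.1 x hx
        omega

theorem mem_dropWhile_of_ge (ks : List Nat) (c : Int) (h : ks.Pairwise (· < ·))
    {k' : Nat} (hmem : k' ∈ ks) (hk' : c ≤ (k' : Int)) :
    k' ∈ ks.dropWhile (fun k : Nat => decide ((k : Int) < c)) := by
  induction ks with
  | nil => simp at hmem
  | cons k t ih =>
    rw [List.pairwise_cons] at h
    rw [List.dropWhile_cons]
    by_cases hk : (k : Int) < c
    · rw [if_pos (by simpa using hk)]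
      rcases List.mem_cons.1 hmem with rfl | hmem
      · omega
      · exact ih h.2 hmem
    · rw [if_neg (by simpa using hk)]
      exact hmem

theorem pop_decomp {α : Type} (l : List α) (p : α → Bool) :
    l = (l.reverse.dropWhile p).reverse ++ (l.reverse.takeWhile p).reverse ∧
      ∀ x ∈ (l.reverse.takeWhile p).reverse, p x = true := by
  constructor
  · have h := List.takeWhile_append_dropWhile (p := p) (l := l.reverse)
    have h2 := congrArg List.reverse h
    rw [List.reverse_append, List.reverse_reverse] at h2
    exact h2.symm
  · intro x hx
    rw [List.mem_reverse] at hx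
    exact List.mem_takeWhile_imp hx

theorem dropWhile_head_not {α : Type} (l : List α) (p : α → Bool) (a : α) (t : List α)
    (h : l.dropWhile p = a :: t) : p a = false := by
  induction l with
  | nil => simp at h
  | cons x xs ih =>
    rw [List.dropWhile_cons] at h
    by_cases hx : p x
    · rw [if_pos (by simpa using hx)] at h
      exact ih h
    · rw [if_neg (by simpa using hx)] at h
      cases h
      simpa using hx

-- deque entries
def fent (A : List Int) (B : Int) (k : Nat) : Int × Int × List Int :=
  ((k : Int), (dpd A B k).1, (dpd A B k).2)

-- the loop invariant of B (after i iterations)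
def InvB (A : List Int) (B : Int) (i : Nat)
    (st : List (Int × Int × List Int) × Option (Int × List Int)) : Prop :=
  (1 ≤ i → st.2 = dp A B (i - 1)) ∧
  ∃ ks : List Nat,
    st.1 = ks.map (fent A B) ∧
    ks.Pairwise (· < ·) ∧
    (∀ k ∈ ks, k < i ∧ (i : Int) - 1 - B ≤ (k : Int) ∧ dp A B k ≠ none) ∧
    (ks.map (dpd A B)).Pairwise (appLt (A.length : Int)) ∧
    (∀ k : Nat, k < i → (i : Int) - 1 - B ≤ (k : Int) → dp A B k ≠ none →
      ∃ k' ∈ ks, k ≤ k' ∧ appLe (A.length : Int) (dpd A B k') (dpd A B k))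

theorem popFront_map (A : List Int) (B : Int) (ks : List Nat) (i : Nat) :
    popFront B (ks.map (fent A B)) i =
      (ks.dropWhile (fun k : Nat => decide ((k : Int) < (i : Int) - B))).map (fent A B) := by
  unfold popFront
  rw [List.dropWhile_map]
  rfl

theorem dp_entries_lt (A : List Int) (B : Int) (hA : ∀ x ∈ A, -1 ≤ x) (hB : 1 ≤ B)
    {k : Nat} (hk : k < A.length) {s : Int} (hs : (k : Int) < s) :
    ∀ x ∈ (dpd A B k).2, x < s := by
  intro x hx
  cases hdp : dp A B k with
  | none => rw [dpd, hdp] at hx; simp at hx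
  | some cp =>
    have := (dp_good A B hA hB k hk cp.1 cp.2 (by rw [hdp])).2 x
      (by rw [dpd, hdp] at hx; simpa using hx)
    omega

-- the main step: one loop iteration of B preserves the invariant
theorem stepB_inv (A : List Int) (B : Int) (hA : ∀ x ∈ A, -1 ≤ x) (hB : 1 ≤ B)
    {i : Nat} (hin : i < A.length)
    {st : List (Int × Int × List Int) × Option (Int × List Int)}
    (hinv : InvB A B i st) : InvB A B (i + 1) (stepB A B st i) := by
  obtain ⟨hcur, ks, hdq, hksP, hksM, hvalP, hcomp⟩ := hinv
  -- the popleft stage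
  have hdq1 : popFront B st.1 i =
      (ks.dropWhile (fun k : Nat => decide ((k : Int) < (i : Int) - B))).map (fent A B) := by
    rw [hdq, popFront_map]
  have hks1P : (ks.dropWhile (fun k : Nat => decide ((k : Int) < (i : Int) - B))).Pairwise (· < ·) :=
    hksP.sublist (List.dropWhile_sublist _)
  have hks1M : ∀ k ∈ ks.dropWhile (fun k : Nat => decide ((k : Int) < (i : Int) - B)),
      k < i ∧ (i : Int) - B ≤ (k : Int) ∧ dp A B k ≠ none := by
    intro k hk
    have hmem : k ∈ ks := (List.dropWhile_sublist _).mem hk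
    exact ⟨(hksM k hmem).1, dropWhile_ge ks _ hksP k hk, (hksM k hmem).2.2⟩
  have hks1V : ((ks.dropWhile (fun k : Nat => decide ((k : Int) < (i : Int) - B))).map
      (dpd A B)).Pairwise (appLt (A.length : Int)) :=
    hvalP.sublist (List.Sublist.map _ (List.dropWhile_sublist _))
  have hcomp1 : ∀ k : Nat, k < i → (i : Int) - B ≤ (k : Int) → dp A B k ≠ none →
      ∃ k' ∈ ks.dropWhile (fun k : Nat => decide ((k : Int) < (i : Int) - B)),
        k ≤ k' ∧ appLe (A.length : Int) (dpd A B k') (dpd A B k) := by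
    intro k hk1 hk2 hk3
    obtain ⟨k', hk'm, hk'le, hk'v⟩ := hcomp k hk1 (by omega) hk3
    exact ⟨k', mem_dropWhile_of_ge ks _ hksP hk'm (by omega), hk'le, hk'v⟩
  set ks1 := ks.dropWhile (fun k : Nat => decide ((k : Int) < (i : Int) - B)) with hks1
  unfold stepB
  rw [hdq1]
  by_cases hAi : PySem.List.pyGetD A (i : Int) 0 = -1
  · -- blocked position: best = none, dp i = none
    have hcur0 : curOf A (ks1.map (fent A B)) i = none := by
      unfold curOf; rw [if_pos hAi]
    have hdpi : dp A B i = none := by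
      unfold dp dpv; rw [dps_length, if_pos hAi]
    rw [hcur0]
    refine ⟨fun _ => by simp [hdpi], ks1, rfl, hks1P, ?_, hks1V, ?_⟩
    · intro k hk
      obtain ⟨h1, h2, h3⟩ := hks1M k hk
      exact ⟨by omega, by push_cast; omega, h3⟩
    · intro k hk1 hk2 hk3
      have hki : k ≠ i := fun h => hk3 (h ▸ hdpi)
      obtain ⟨k', hm, hle, hv⟩ := hcomp1 k (by omega) (by push_cast at hk2 ⊢; omega) hk3
      exact ⟨k', hm, hle, hv⟩
  · by_cases hi0 : i = 0
    · -- the start position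
      subst hi0
      have hksnil : ks1 = [] := by
        rw [hks1]
        cases hks : ks with
        | nil => rfl
        | cons a t => exact absurd ((hksM a (by rw [hks]; simp)).1) (by omega)
      have hcur0 : curOf A (ks1.map (fent A B)) 0 =
          some (PySem.List.pyGetD A 0 0, [0]) := by
        unfold curOf
        rw [if_neg (by simpa using hAi)]
        rfl
      have hdp0 : dp A B 0 = some (0 + PySem.List.pyGetD A 0 0, [0]) := by
        unfold dp dpv
        rw [show dps A B 0 = [] from rfl]
        rw [cands0 A B hB]
        rw [if_neg (by simpa using hAi)]
        rfl
      rw [hcur0]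
      have hdpd0 : dpd A B 0 = (0 + PySem.List.pyGetD A 0 0, [0]) := by
        rw [dpd, hdp0]; rfl
      refine ⟨fun _ => by rw [hdp0]; simp, [0], ?_, by simp, ?_, by simp, ?_⟩
      · rw [hksnil]
        unfold pushBack
        simp only [List.map_nil, List.reverse_nil, List.dropWhile_nil, List.nil_append,
          List.map_cons]
        rw [show fent A B 0 = ((0 : Int), (dpd A B 0).1, (dpd A B 0).2) from rfl, hdpd0]
        simp
      · intro k hk
        rw [List.mem_singleton] at hk
        subst hk
        refine ⟨by omega, by push_cast; omega, by rw [hdp0]; simp⟩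
      · intro k hk1 _ _
        have : k = 0 := by omega
        subst this
        exact ⟨0, by simp, le_refl _, Or.inl rfl⟩
    · -- i ≥ 1
      cases hks1c : ks1 with
      | nil =>
        -- empty window: position i unreachable
        have hcur0 : curOf A (([] : List Nat).map (fent A B)) i = none := by
          unfold curOf
          rw [if_neg hAi, if_neg hi0]
          rfl
        have hcnil : candsOf A B (dps A B i) = [] := by
          rw [List.eq_nil_iff_forall_not_mem]
          intro y hy
          obtain ⟨k, hk1, hk2, c, p, hdpk, -⟩ :=
            cands_mem_elim A B hB (by omega) (by omega) hy
          obtain ⟨k', hk'm, -, -⟩ := hcomp1 k hk1 hk2 (by simp [hdpk])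
          rw [hks1c] at hk'm
          simp at hk'm
        have hdpi : dp A B i = none := by
          unfold dp dpv
          rw [dps_length, if_neg hAi, hcnil]
          rfl
        rw [hcur0]
        refine ⟨fun _ => by simp [hdpi], [], rfl, by simp, by simp, by simp, ?_⟩
        intro k hk1 hk2 hk3
        have hki : k ≠ i := fun h => hk3 (h ▸ hdpi)
        obtain ⟨k', hk'm, -, -⟩ := hcomp1 k (by omega) (by push_cast at hk2 ⊢; omega) hk3
        rw [hks1c] at hk'm
        simp at hk'm
      | cons kf kt =>
        obtain ⟨hkf1, hkf2, hkf3⟩ := hks1M kf (by rw [hks1c]; simp)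
        have hdpkf : dp A B kf = some (dpd A B kf) := by
          cases h : dp A B kf with
          | none => exact absurd h hkf3
          | some cp => rw [dpd, h]; rfl
        have hcurv : curOf A ((kf :: kt).map (fent A B)) i =
            some ((dpd A B kf).1 + PySem.List.pyGetD A (i : Int) 0,
              (dpd A B kf).2 ++ [(i : Int)]) := by
          unfold curOf
          rw [if_neg hAi, if_neg hi0]
          rfl
        -- dp i = the value B computes from the front of the deque
        have hfmem : ((dpd A B kf).1, (dpd A B kf).2 ++ [(i : Int)]) ∈
            candsOf A B (dps A B i) :=
          cands_mem_intro A B hA hB (by omega) (by omega) hkf1 hkf2 hdpkf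
        have hfmin : ∀ y ∈ candsOf A B (dps A B i),
            ¬ lt2 y ((dpd A B kf).1, (dpd A B kf).2 ++ [(i : Int)]) := by
          intro y hy hlt
          obtain ⟨k, hk1, hk2, c, p, hdpk, rfl⟩ :=
            cands_mem_elim A B hB (by omega) (by omega) hy
          have hdok : dpd A B k = (c, p) := by rw [dpd, hdpk]; rfl
          obtain ⟨k', hk'm, hk'le, hk'v⟩ := hcomp1 k hk1 hk2 (by simp [hdpk])
          have hfk' : appLe (A.length : Int) (dpd A B kf) (dpd A B k') := by
            rw [hks1c] at hk'm
            rcases List.mem_cons.1 hk'm with rfl | hk'm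
            · exact Or.inl rfl
            · have hp := hks1V
              rw [hks1c, List.map_cons, List.pairwise_cons] at hp
              exact Or.inr (hp.1 _ (List.mem_map_of_mem hk'm))
          have hfk : appLe (A.length : Int) (dpd A B kf) (dpd A B k) :=
            appLe_trans_lt hfk' hk'v
          have hbk : ∀ x ∈ (dpd A B k).2, x < (i : Int) :=
            dp_entries_lt A B hA hB (by omega) (by omega)
          have hbk' : ∀ x ∈ (dpd A B k).2, x < (A.length : Int) :=
            dp_entries_lt A B hA hB (by omega) (by omega)
          have hbf : ∀ x ∈ (dpd A B kf).2, x < (i : Int) :=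
            dp_entries_lt A B hA hB (by omega) (by omega)
          have hbf' : ∀ x ∈ (dpd A B kf).2, x < (A.length : Int) :=
            dp_entries_lt A B hA hB (by omega) (by omega)
          rw [show (c, p ++ [(i : Int)]) =
              ((dpd A B k).1, (dpd A B k).2 ++ [(i : Int)]) by rw [hdok]] at hlt
          have happ := (lt2_append_iff_appLt hbk hbf hbk' hbf').1 hlt
          rcases hfk with heq | hltf
          · exact appLt_irrefl (heq ▸ happ)
          · exact appLt_asymm hltf happ
        have hdpi : dp A B i = some ((dpd A B kf).1 + PySem.List.pyGetD A (i : Int) 0,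
            (dpd A B kf).2 ++ [(i : Int)]) := by
          unfold dp dpv
          rw [dps_length, if_neg hAi]
          cases hmin : PySem.List.min2? (candsOf A B (dps A B i)) Prod.fst Prod.snd with
          | none =>
            rw [min2?_pair_none.1 hmin] at hfmem
            simp at hfmem
          | some m =>
            obtain ⟨hmmem, hmmin⟩ := min2?_pair_spec hmin
            have hmf : m = ((dpd A B kf).1, (dpd A B kf).2 ++ [(i : Int)]) := by
              rcases lt2_total (hfmin m hmmem) with hlt | heq
              · exact absurd hlt (hmmin _ hfmem)
              · exact heq.symm ▸ rfl
            rw [hmf]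
        have hdpdi : dpd A B i = ((dpd A B kf).1 + PySem.List.pyGetD A (i : Int) 0,
            (dpd A B kf).2 ++ [(i : Int)]) := by rw [dpd, hdpi]; rfl
        -- the push stage
        have hpush : pushBack ((kf :: kt).map (fent A B)) i
            ((dpd A B kf).1 + PySem.List.pyGetD A (i : Int) 0,
              (dpd A B kf).2 ++ [(i : Int)]) =
            ((((kf :: kt).reverse.dropWhile (fun k : Nat =>
                !better (dpd A B k).1 (dpd A B k).2
                  ((dpd A B kf).1 + PySem.List.pyGetD A (i : Int) 0)
                  ((dpd A B kf).2 ++ [(i : Int)]))).reverse ++ [i]).map (fent A B)) := by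
          unfold pushBack
          rw [← List.map_reverse, List.dropWhile_map, ← List.map_reverse, List.map_append]
          congr 1
          simp [fent, hdpdi]
        rw [hks1c] at hks1P hks1M hks1V hcomp1
        simp only [hcurv]
        rw [hpush]
        set vv := ((dpd A B kf).1 + PySem.List.pyGetD A (i : Int) 0,
          (dpd A B kf).2 ++ [(i : Int)]) with hvv
        set P := (fun k : Nat => !better (dpd A B k).1 (dpd A B k).2 vv.1 vv.2) with hP
        have hvvb : ∀ x ∈ vv.2, x < (A.length : Int) := by
          intro x hx
          rw [hvv] at hx
          rcases List.mem_append.1 hx with hx | hx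
          · exact dp_entries_lt A B hA hB (by omega) (by omega) x hx
          · rw [List.mem_singleton] at hx; subst hx; push_cast; omega
        obtain ⟨hdec, hdropped⟩ := pop_decomp (kf :: kt) P
        have hkeptsub : ((kf :: kt).reverse.dropWhile P).reverse.Sublist (kf :: kt) := by
          conv_rhs => rw [hdec]
          exact List.sublist_append_left _ _
        have hkeptV : (((kf :: kt).reverse.dropWhile P).reverse.map (dpd A B)).Pairwise
            (appLt (A.length : Int)) := hks1V.sublist (hkeptsub.map _)
        have hcross : ∀ k ∈ ((kf :: kt).reverse.dropWhile P).reverse,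
            appLt (A.length : Int) (dpd A B k) vv := by
          cases hkc : (kf :: kt).reverse.dropWhile P with
          | nil => simp
          | cons a t =>
            have hqa : P a = false := dropWhile_head_not _ _ _ _ hkc
            have hamem : a ∈ kf :: kt := by
              rw [← List.mem_reverse]
              exact (List.dropWhile_sublist _).mem (by rw [hkc]; simp)
            have hab : ∀ x ∈ (dpd A B a).2, x < (A.length : Int) :=
              dp_entries_lt A B hA hB
                (by have := (hks1M a hamem).1; omega)
                (by have := (hks1M a hamem).1; push_cast; omega)
            have ha_lt : appLt (A.length : Int) (dpd A B a) vv := by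
              rw [hP] at hqa
              simp only [Bool.not_eq_false'] at hqa
              exact (better_iff hab hvvb).1 hqa
            intro k hk
            rw [List.reverse_cons] at hk
            rcases List.mem_append.1 hk with hk | hk
            · have hkV := hkeptV
              rw [hkc, List.reverse_cons, List.map_append] at hkV
              have hcr := (List.pairwise_append.1 hkV).2.2
              exact appLt_trans (hcr _ (List.mem_map_of_mem hk) _ (by simp)) ha_lt
            · rw [List.mem_singleton] at hk
              subst hk
              exact ha_lt
        refine ⟨fun _ => by simp [hdpi], ((kf :: kt).reverse.dropWhile P).reverse ++ [i],
          rfl, ?_, ?_, ?_, ?_⟩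
        · rw [List.pairwise_append]
          refine ⟨hks1P.sublist hkeptsub, by simp, ?_⟩
          intro a ha b hb
          rw [List.mem_singleton] at hb
          subst hb
          exact (hks1M a (hkeptsub.subset ha)).1
        · intro k hk
          rcases List.mem_append.1 hk with hk | hk
          · obtain ⟨h1, h2, h3⟩ := hks1M k (hkeptsub.subset hk)
            exact ⟨by omega, by push_cast; omega, h3⟩
          · rw [List.mem_singleton] at hk
            subst hk
            exact ⟨by omega, by push_cast; omega, by simp [hdpi]⟩
        · rw [List.map_append, List.pairwise_append]
          refine ⟨hkeptV, by simp, ?_⟩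
          intro a ha b hb
          rw [List.map_singleton, List.mem_singleton] at hb
          subst hb
          rw [List.mem_map] at ha
          obtain ⟨k, hk, rfl⟩ := ha
          rw [hdpdi]
          exact hcross k hk
        · intro k hk1 hk2 hk3
          by_cases hki : k = i
          · subst hki
            exact ⟨k, by simp, le_refl _, Or.inl rfl⟩
          · have hk2' : (i : Int) - B ≤ (k : Int) := by push_cast at hk2; omega
            obtain ⟨k', hk'm, hk'le, hk'v⟩ := hcomp1 k (by omega) hk2' hk3
            have hk'dec : k' ∈ ((kf :: kt).reverse.dropWhile P).reverse ++
                ((kf :: kt).reverse.takeWhile P).reverse := hdec ▸ hk'm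
            rcases List.mem_append.1 hk'dec with hkept | hdrop
            · exact ⟨k', List.mem_append_left _ hkept, hk'le, hk'v⟩
            · have hPk' : P k' = true := hdropped k' hdrop
              rw [hP] at hPk'
              simp only [Bool.not_eq_true'] at hPk'
              have hk'b : ∀ x ∈ (dpd A B k').2, x < (A.length : Int) :=
                dp_entries_lt A B hA hB
                  (by have := (hks1M k' hk'm).1; omega)
                  (by have := (hks1M k' hk'm).1; push_cast; omega)
              have hnlt : ¬ appLt (A.length : Int) (dpd A B k') vv := by
                intro h
                rw [(better_iff hk'b hvvb).2 h] at hPk'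
                simp at hPk'
              refine ⟨i, by simp, by omega, ?_⟩
              rw [hdpdi]
              exact appLe_trans_lt (appLt_total hnlt) hk'v


-- ---------- assembling the two sides ----------

theorem foldB (A : List Int) (B : Int) (hA : ∀ x ∈ A, -1 ≤ x) (hB : 1 ≤ B) :
    ∀ r : Nat, r ≤ A.length →
      InvB A B r ((List.range r).foldl (stepB A B) ([], none)) := by
  intro r
  induction r with
  | zero =>
    intro _
    exact ⟨fun h => absurd h (by omega), [], rfl, by simp, by simp, by simp,
      fun k hk1 _ _ => absurd hk1 (by omega)⟩
  | succ r ih =>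
    intro h
    rw [List.range_succ, List.foldl_append, List.foldl_cons, List.foldl_nil]
    exact stepB_inv A B hA hB (by omega) (ih (by omega))

theorem alt_eq_dp (A : List Int) (B : Int) (hA : ∀ x ∈ A, -1 ≤ x) (hB : 1 ≤ B)
    (hn : 1 ≤ A.length) :
    cheapestJump_alt A B = (pOf (dp A B (A.length - 1))).map (· + 1) := by
  unfold cheapestJump_alt
  rw [if_neg (by simp only [Bool.or_eq_true, decide_eq_true_eq, not_or]; omega)]
  have hinv := foldB A B hA hB A.length (le_refl _)
  rw [hinv.1 hn]
  cases h : dp A B (A.length - 1) with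
  | none => simp [pOf]
  | some cp => simp [pOf]

theorem cheapestJump_nil (A : List Int) (B : Int) (hn : A.length = 0) (hB : 1 ≤ B) :
    cheapestJump A B = [] := by
  unfold cheapestJump
  rw [hn]
  simp only [List.range_zero, List.foldl_nil, List.replicate_zero, List.nil_append,
    Nat.cast_zero]
  rw [show ((0 : Int) - 1) = -(((1 : Nat) : Nat) : Int) by simp,
    PySem.List.pyGetD_neg_natCast _ _ _ (by omega) (by simp; omega)]
  simp
-- ===== VERDICT (by name: the statement is the Claim_ definition above) =====
theorem cheapestJump_spec : Claim_equal_cheapestJump := by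
  intro A B _ hpre
  obtain ⟨hor, hA'⟩ := hpre
  unfold Spec_cheapestJump
  by_cases hn : A.length = 0
  · have hB : 1 ≤ B := by
      rcases hor with h | h
      · exact absurd (List.length_eq_zero_iff.1 hn) h
      · exact h
    rw [cheapestJump_nil A B hn hB]
    unfold cheapestJump_alt
    rw [if_pos (by simp [hn])]
  · have hn1 : 1 ≤ A.length := by omega
    by_cases hB : 1 ≤ B
    · have hA : ∀ x ∈ A, -1 ≤ x := by
        rcases hA' with h | h
        · omega
        · exact h
      rw [cheapestJump_eq_dp A B hB hn1, alt_eq_dp A B hA hB hn1]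
    · rw [cheapestJump_small A B (by omega) hn1]
      unfold cheapestJump_alt
      rw [if_pos (by simp only [Bool.or_eq_true, decide_eq_true_eq]; right; omega)]
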